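-- pv_equiv track=rewrite | github.com/henryoman/kronos | crypto_accuracy_search.py | incompatible_pair
-- ===== SOURCE A (Python) =====
-- def incompatible_pair(left: str, right: str) -> bool:
--     groups = [
--         {"high_atr", "low_atr"},
--         {"high_vol24", "low_vol24"},
--         {"high_vol72", "low_vol72"},
--         {"high_volume", "low_volume"},
--         {"rsi_hot", "rsi_cold", "rsi_mid"},
--         {"mom24_up", "mom24_down"},
--         {"mom72_up", "mom72_down"},
--         {"trend24_up", "trend24_down"},
--         {"trend72_up", "trend72_down"},
--         {"trend288_up", "trend288_down"},
--         {"hour_0_7", "hour_8_15", "hour_16_23"},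
--         {"weekday", "weekend"},
--     ]
--     return any(left in group and right in group for group in groups)
-- ===== SOURCE B (Python) =====
-- _GROUPS = [
--     ("high_atr", "low_atr"),
--     ("high_vol24", "low_vol24"),
--     ("high_vol72", "low_vol72"),
--     ("high_volume", "low_volume"),
--     ("rsi_hot", "rsi_cold", "rsi_mid"),
--     ("mom24_up", "mom24_down"),
--     ("mom72_up", "mom72_down"),
--     ("trend24_up", "trend24_down"),
--     ("trend72_up", "trend72_down"),
--     ("trend288_up", "trend288_down"),
--     ("hour_0_7", "hour_8_15", "hour_16_23"),
--     ("weekday", "weekend"),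
-- ]
--
-- _LABEL2GROUP = {label: i for i, group in enumerate(_GROUPS) for label in group}
--
--
-- def incompatible_pair(left: str, right: str) -> bool:
--     g = _LABEL2GROUP.get(left)
--     return g is not None and g == _LABEL2GROUP.get(right)
-- ===== Notes on version B (the rewrite author's own statement) =====
-- stated objective: idiomatic
-- what changed: Replaces the per-call any(...) scan over the 12 exclusivity groups by a label-to-group-index dictionary built once at module level, so the check becomes two dictionary lookups compared for equality.
import Mathlib
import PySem

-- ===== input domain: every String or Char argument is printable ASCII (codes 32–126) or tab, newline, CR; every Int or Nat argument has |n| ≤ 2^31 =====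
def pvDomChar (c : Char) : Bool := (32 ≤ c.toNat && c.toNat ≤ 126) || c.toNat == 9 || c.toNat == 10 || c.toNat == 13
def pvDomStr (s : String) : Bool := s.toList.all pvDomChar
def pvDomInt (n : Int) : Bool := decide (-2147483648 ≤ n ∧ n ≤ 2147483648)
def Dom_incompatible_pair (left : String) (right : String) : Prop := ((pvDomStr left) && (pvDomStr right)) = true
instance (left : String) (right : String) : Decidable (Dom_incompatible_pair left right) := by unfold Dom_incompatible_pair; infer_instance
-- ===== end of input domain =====

-- B replaces A's per-call any-scan over the 12 exclusivity groups by a label → group-index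
-- dictionary built once plus two lookups compared for equality (objective: idiomatic).

-- ===== PORT A =====
def incompatible_pair (left : String) (right : String) : Bool :=
  let groups : List (PySem.Set String) := [
    PySem.Set.ofList ["high_atr", "low_atr"],
    PySem.Set.ofList ["high_vol24", "low_vol24"],
    PySem.Set.ofList ["high_vol72", "low_vol72"],
    PySem.Set.ofList ["high_volume", "low_volume"],
    PySem.Set.ofList ["rsi_hot", "rsi_cold", "rsi_mid"],
    PySem.Set.ofList ["mom24_up", "mom24_down"],
    PySem.Set.ofList ["mom72_up", "mom72_down"],
    PySem.Set.ofList ["trend24_up", "trend24_down"],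
    PySem.Set.ofList ["trend72_up", "trend72_down"],
    PySem.Set.ofList ["trend288_up", "trend288_down"],
    PySem.Set.ofList ["hour_0_7", "hour_8_15", "hour_16_23"],
    PySem.Set.ofList ["weekday", "weekend"]]
  groups.any (fun group => PySem.Set.contains group left && PySem.Set.contains group right)

-- ===== PORT B =====
def pvGroupsB : List (List String) := [
    ["high_atr", "low_atr"],
    ["high_vol24", "low_vol24"],
    ["high_vol72", "low_vol72"],
    ["high_volume", "low_volume"],
    ["rsi_hot", "rsi_cold", "rsi_mid"],
    ["mom24_up", "mom24_down"],
    ["mom72_up", "mom72_down"],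
    ["trend24_up", "trend24_down"],
    ["trend72_up", "trend72_down"],
    ["trend288_up", "trend288_down"],
    ["hour_0_7", "hour_8_15", "hour_16_23"],
    ["weekday", "weekend"]]

def pvLabel2Group : PySem.Dict String Int :=
  (PySem.List.enumerate pvGroupsB).foldl
    (fun d ig => ig.2.foldl (fun d label => d.insert label ig.1) d) PySem.Dict.empty

def incompatible_pair_alt (left : String) (right : String) : Bool :=
  match PySem.Dict.get? pvLabel2Group left with
  | none => false
  | some g => PySem.Dict.get? pvLabel2Group right == some g

-- ===== PRECONDITION & SPEC =====
def Spec_incompatible_pair (left : String) (right : String) (out : Bool) : Prop := out = incompatible_pair_alt left right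
instance (left : String) (right : String) (out : Bool) : Decidable (Spec_incompatible_pair left right out) := by unfold Spec_incompatible_pair; infer_instance

-- ===== CLAIM (what is proved, stated in full; the proofs are below) =====
def Claim_equal_incompatible_pair : Prop := ∀ (left : String) (right : String), Dom_incompatible_pair left right → Spec_incompatible_pair left right (incompatible_pair left right)

-- ===== LEMMAS AND PROOFS =====

-- the group index of a label (none: belongs to no group); the groups are pairwise disjoint,
-- so this classifies every string and both ports factor through it
def pvClassify (s : String) : Option Int :=
  if s = "high_atr" then some 0
  else if s = "low_atr" then some 0
  else if s = "high_vol24" then some 1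
  else if s = "low_vol24" then some 1
  else if s = "high_vol72" then some 2
  else if s = "low_vol72" then some 2
  else if s = "high_volume" then some 3
  else if s = "low_volume" then some 3
  else if s = "rsi_hot" then some 4
  else if s = "rsi_cold" then some 4
  else if s = "rsi_mid" then some 4
  else if s = "mom24_up" then some 5
  else if s = "mom24_down" then some 5
  else if s = "mom72_up" then some 6
  else if s = "mom72_down" then some 6
  else if s = "trend24_up" then some 7
  else if s = "trend24_down" then some 7
  else if s = "trend72_up" then some 8
  else if s = "trend72_down" then some 8
  else if s = "trend288_up" then some 9
  else if s = "trend288_down" then some 9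
  else if s = "hour_0_7" then some 10
  else if s = "hour_8_15" then some 10
  else if s = "hour_16_23" then some 10
  else if s = "weekday" then some 11
  else if s = "weekend" then some 11
  else none

theorem pvDict_eval : pvLabel2Group = PySem.Dict.mk [("high_atr", 0), ("low_atr", 0), ("high_vol24", 1), ("low_vol24", 1), ("high_vol72", 2), ("low_vol72", 2), ("high_volume", 3), ("low_volume", 3), ("rsi_hot", 4), ("rsi_cold", 4), ("rsi_mid", 4), ("mom24_up", 5), ("mom24_down", 5), ("mom72_up", 6), ("mom72_down", 6), ("trend24_up", 7), ("trend24_down", 7), ("trend72_up", 8), ("trend72_down", 8), ("trend288_up", 9), ("trend288_down", 9), ("hour_0_7", 10), ("hour_8_15", 10), ("hour_16_23", 10), ("weekday", 11), ("weekend", 11)] := by rfl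

theorem pvGet_eq (s : String) : PySem.Dict.get? pvLabel2Group s = pvClassify s := by
  rw [pvDict_eval]
  by_cases h0 : s = "high_atr"
  · subst h0; simp [PySem.Dict.get?_mk_cons, pvClassify]
  by_cases h1 : s = "low_atr"
  · subst h1; simp [PySem.Dict.get?_mk_cons, pvClassify]
  by_cases h2 : s = "high_vol24"
  · subst h2; simp [PySem.Dict.get?_mk_cons, pvClassify]
  by_cases h3 : s = "low_vol24"
  · subst h3; simp [PySem.Dict.get?_mk_cons, pvClassify]
  by_cases h4 : s = "high_vol72"
  · subst h4; simp [PySem.Dict.get?_mk_cons, pvClassify]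
  by_cases h5 : s = "low_vol72"
  · subst h5; simp [PySem.Dict.get?_mk_cons, pvClassify]
  by_cases h6 : s = "high_volume"
  · subst h6; simp [PySem.Dict.get?_mk_cons, pvClassify]
  by_cases h7 : s = "low_volume"
  · subst h7; simp [PySem.Dict.get?_mk_cons, pvClassify]
  by_cases h8 : s = "rsi_hot"
  · subst h8; simp [PySem.Dict.get?_mk_cons, pvClassify]
  by_cases h9 : s = "rsi_cold"
  · subst h9; simp [PySem.Dict.get?_mk_cons, pvClassify]
  by_cases h10 : s = "rsi_mid"
  · subst h10; simp [PySem.Dict.get?_mk_cons, pvClassify]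
  by_cases h11 : s = "mom24_up"
  · subst h11; simp [PySem.Dict.get?_mk_cons, pvClassify]
  by_cases h12 : s = "mom24_down"
  · subst h12; simp [PySem.Dict.get?_mk_cons, pvClassify]
  by_cases h13 : s = "mom72_up"
  · subst h13; simp [PySem.Dict.get?_mk_cons, pvClassify]
  by_cases h14 : s = "mom72_down"
  · subst h14; simp [PySem.Dict.get?_mk_cons, pvClassify]
  by_cases h15 : s = "trend24_up"
  · subst h15; simp [PySem.Dict.get?_mk_cons, pvClassify]
  by_cases h16 : s = "trend24_down"
  · subst h16; simp [PySem.Dict.get?_mk_cons, pvClassify]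
  by_cases h17 : s = "trend72_up"
  · subst h17; simp [PySem.Dict.get?_mk_cons, pvClassify]
  by_cases h18 : s = "trend72_down"
  · subst h18; simp [PySem.Dict.get?_mk_cons, pvClassify]
  by_cases h19 : s = "trend288_up"
  · subst h19; simp [PySem.Dict.get?_mk_cons, pvClassify]
  by_cases h20 : s = "trend288_down"
  · subst h20; simp [PySem.Dict.get?_mk_cons, pvClassify]
  by_cases h21 : s = "hour_0_7"
  · subst h21; simp [PySem.Dict.get?_mk_cons, pvClassify]
  by_cases h22 : s = "hour_8_15"
  · subst h22; simp [PySem.Dict.get?_mk_cons, pvClassify]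
  by_cases h23 : s = "hour_16_23"
  · subst h23; simp [PySem.Dict.get?_mk_cons, pvClassify]
  by_cases h24 : s = "weekday"
  · subst h24; simp [PySem.Dict.get?_mk_cons, pvClassify]
  by_cases h25 : s = "weekend"
  · subst h25; simp [PySem.Dict.get?_mk_cons, pvClassify]
  simp [PySem.Dict.get?_mk_cons, PySem.Dict.get?, pvClassify, beq_iff_eq, h0, h1, h2, h3, h4, h5, h6, h7, h8, h9, h10, h11, h12, h13, h14, h15, h16, h17, h18, h19, h20, h21, h22, h23, h24, h25, Ne.symm h0, Ne.symm h1, Ne.symm h2, Ne.symm h3, Ne.symm h4, Ne.symm h5, Ne.symm h6, Ne.symm h7, Ne.symm h8, Ne.symm h9, Ne.symm h10, Ne.symm h11, Ne.symm h12, Ne.symm h13, Ne.symm h14, Ne.symm h15, Ne.symm h16, Ne.symm h17, Ne.symm h18, Ne.symm h19, Ne.symm h20, Ne.symm h21, Ne.symm h22, Ne.symm h23, Ne.symm h24, Ne.symm h25]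

theorem pvGall (r : String) :
    (PySem.Set.contains (PySem.Set.ofList ["high_atr", "low_atr"]) r = (pvClassify r == some 0)) ∧ (PySem.Set.contains (PySem.Set.ofList ["high_vol24", "low_vol24"]) r = (pvClassify r == some 1)) ∧ (PySem.Set.contains (PySem.Set.ofList ["high_vol72", "low_vol72"]) r = (pvClassify r == some 2)) ∧ (PySem.Set.contains (PySem.Set.ofList ["high_volume", "low_volume"]) r = (pvClassify r == some 3)) ∧ (PySem.Set.contains (PySem.Set.ofList ["rsi_hot", "rsi_cold", "rsi_mid"]) r = (pvClassify r == some 4)) ∧ (PySem.Set.contains (PySem.Set.ofList ["mom24_up", "mom24_down"]) r = (pvClassify r == some 5)) ∧ (PySem.Set.contains (PySem.Set.ofList ["mom72_up", "mom72_down"]) r = (pvClassify r == some 6)) ∧ (PySem.Set.contains (PySem.Set.ofList ["trend24_up", "trend24_down"]) r = (pvClassify r == some 7)) ∧ (PySem.Set.contains (PySem.Set.ofList ["trend72_up", "trend72_down"]) r = (pvClassify r == some 8)) ∧ (PySem.Set.contains (PySem.Set.ofList ["trend288_up", "trend288_down"]) r = (pvClassify r == some 9)) ∧ (PySem.Set.contains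 (PySem.Set.ofList ["hour_0_7", "hour_8_15", "hour_16_23"]) r = (pvClassify r == some 10)) ∧ (PySem.Set.contains (PySem.Set.ofList ["weekday", "weekend"]) r = (pvClassify r == some 11)) := by
  by_cases h0 : r = "high_atr"
  · subst h0; simp [pvClassify, PySem.Set.contains, PySem.Set.ofList]
  by_cases h1 : r = "low_atr"
  · subst h1; simp [pvClassify, PySem.Set.contains, PySem.Set.ofList]
  by_cases h2 : r = "high_vol24"
  · subst h2; simp [pvClassify, PySem.Set.contains, PySem.Set.ofList]
  by_cases h3 : r = "low_vol24"
  · subst h3; simp [pvClassify, PySem.Set.contains, PySem.Set.ofList]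
  by_cases h4 : r = "high_vol72"
  · subst h4; simp [pvClassify, PySem.Set.contains, PySem.Set.ofList]
  by_cases h5 : r = "low_vol72"
  · subst h5; simp [pvClassify, PySem.Set.contains, PySem.Set.ofList]
  by_cases h6 : r = "high_volume"
  · subst h6; simp [pvClassify, PySem.Set.contains, PySem.Set.ofList]
  by_cases h7 : r = "low_volume"
  · subst h7; simp [pvClassify, PySem.Set.contains, PySem.Set.ofList]
  by_cases h8 : r = "rsi_hot"
  · subst h8; simp [pvClassify, PySem.Set.contains, PySem.Set.ofList]
  by_cases h9 : r = "rsi_cold"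
  · subst h9; simp [pvClassify, PySem.Set.contains, PySem.Set.ofList]
  by_cases h10 : r = "rsi_mid"
  · subst h10; simp [pvClassify, PySem.Set.contains, PySem.Set.ofList]
  by_cases h11 : r = "mom24_up"
  · subst h11; simp [pvClassify, PySem.Set.contains, PySem.Set.ofList]
  by_cases h12 : r = "mom24_down"
  · subst h12; simp [pvClassify, PySem.Set.contains, PySem.Set.ofList]
  by_cases h13 : r = "mom72_up"
  · subst h13; simp [pvClassify, PySem.Set.contains, PySem.Set.ofList]
  by_cases h14 : r = "mom72_down"
  · subst h14; simp [pvClassify, PySem.Set.contains, PySem.Set.ofList]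
  by_cases h15 : r = "trend24_up"
  · subst h15; simp [pvClassify, PySem.Set.contains, PySem.Set.ofList]
  by_cases h16 : r = "trend24_down"
  · subst h16; simp [pvClassify, PySem.Set.contains, PySem.Set.ofList]
  by_cases h17 : r = "trend72_up"
  · subst h17; simp [pvClassify, PySem.Set.contains, PySem.Set.ofList]
  by_cases h18 : r = "trend72_down"
  · subst h18; simp [pvClassify, PySem.Set.contains, PySem.Set.ofList]
  by_cases h19 : r = "trend288_up"
  · subst h19; simp [pvClassify, PySem.Set.contains, PySem.Set.ofList]
  by_cases h20 : r = "trend288_down"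
  · subst h20; simp [pvClassify, PySem.Set.contains, PySem.Set.ofList]
  by_cases h21 : r = "hour_0_7"
  · subst h21; simp [pvClassify, PySem.Set.contains, PySem.Set.ofList]
  by_cases h22 : r = "hour_8_15"
  · subst h22; simp [pvClassify, PySem.Set.contains, PySem.Set.ofList]
  by_cases h23 : r = "hour_16_23"
  · subst h23; simp [pvClassify, PySem.Set.contains, PySem.Set.ofList]
  by_cases h24 : r = "weekday"
  · subst h24; simp [pvClassify, PySem.Set.contains, PySem.Set.ofList]
  by_cases h25 : r = "weekend"
  · subst h25; simp [pvClassify, PySem.Set.contains, PySem.Set.ofList]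
  simp [pvClassify, PySem.Set.contains, PySem.Set.ofList, beq_iff_eq, h0, h1, h2, h3, h4, h5, h6, h7, h8, h9, h10, h11, h12, h13, h14, h15, h16, h17, h18, h19, h20, h21, h22, h23, h24, h25, Ne.symm h0, Ne.symm h1, Ne.symm h2, Ne.symm h3, Ne.symm h4, Ne.symm h5, Ne.symm h6, Ne.symm h7, Ne.symm h8, Ne.symm h9, Ne.symm h10, Ne.symm h11, Ne.symm h12, Ne.symm h13, Ne.symm h14, Ne.symm h15, Ne.symm h16, Ne.symm h17, Ne.symm h18, Ne.symm h19, Ne.symm h20, Ne.symm h21, Ne.symm h22, Ne.symm h23, Ne.symm h24, Ne.symm h25]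

theorem pvAL0 (r : String) : incompatible_pair "high_atr" r = (pvClassify r == some 0) := by
  rw [← (pvGall r).1]
  simp [incompatible_pair, PySem.Set.contains, PySem.Set.ofList]

theorem pvAL1 (r : String) : incompatible_pair "low_atr" r = (pvClassify r == some 0) := by
  rw [← (pvGall r).1]
  simp [incompatible_pair, PySem.Set.contains, PySem.Set.ofList]

theorem pvAL2 (r : String) : incompatible_pair "high_vol24" r = (pvClassify r == some 1) := by
  rw [← (pvGall r).2.1]
  simp [incompatible_pair, PySem.Set.contains, PySem.Set.ofList]

theorem pvAL3 (r : String) : incompatible_pair "low_vol24" r = (pvClassify r == some 1) := by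
  rw [← (pvGall r).2.1]
  simp [incompatible_pair, PySem.Set.contains, PySem.Set.ofList]

theorem pvAL4 (r : String) : incompatible_pair "high_vol72" r = (pvClassify r == some 2) := by
  rw [← (pvGall r).2.2.1]
  simp [incompatible_pair, PySem.Set.contains, PySem.Set.ofList]

theorem pvAL5 (r : String) : incompatible_pair "low_vol72" r = (pvClassify r == some 2) := by
  rw [← (pvGall r).2.2.1]
  simp [incompatible_pair, PySem.Set.contains, PySem.Set.ofList]

theorem pvAL6 (r : String) : incompatible_pair "high_volume" r = (pvClassify r == some 3) := by
  rw [← (pvGall r).2.2.2.1]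
  simp [incompatible_pair, PySem.Set.contains, PySem.Set.ofList]

theorem pvAL7 (r : String) : incompatible_pair "low_volume" r = (pvClassify r == some 3) := by
  rw [← (pvGall r).2.2.2.1]
  simp [incompatible_pair, PySem.Set.contains, PySem.Set.ofList]

theorem pvAL8 (r : String) : incompatible_pair "rsi_hot" r = (pvClassify r == some 4) := by
  rw [← (pvGall r).2.2.2.2.1]
  simp [incompatible_pair, PySem.Set.contains, PySem.Set.ofList]

theorem pvAL9 (r : String) : incompatible_pair "rsi_cold" r = (pvClassify r == some 4) := by
  rw [← (pvGall r).2.2.2.2.1]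
  simp [incompatible_pair, PySem.Set.contains, PySem.Set.ofList]

theorem pvAL10 (r : String) : incompatible_pair "rsi_mid" r = (pvClassify r == some 4) := by
  rw [← (pvGall r).2.2.2.2.1]
  simp [incompatible_pair, PySem.Set.contains, PySem.Set.ofList]

theorem pvAL11 (r : String) : incompatible_pair "mom24_up" r = (pvClassify r == some 5) := by
  rw [← (pvGall r).2.2.2.2.2.1]
  simp [incompatible_pair, PySem.Set.contains, PySem.Set.ofList]

theorem pvAL12 (r : String) : incompatible_pair "mom24_down" r = (pvClassify r == some 5) := by
  rw [← (pvGall r).2.2.2.2.2.1]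
  simp [incompatible_pair, PySem.Set.contains, PySem.Set.ofList]

theorem pvAL13 (r : String) : incompatible_pair "mom72_up" r = (pvClassify r == some 6) := by
  rw [← (pvGall r).2.2.2.2.2.2.1]
  simp [incompatible_pair, PySem.Set.contains, PySem.Set.ofList]

theorem pvAL14 (r : String) : incompatible_pair "mom72_down" r = (pvClassify r == some 6) := by
  rw [← (pvGall r).2.2.2.2.2.2.1]
  simp [incompatible_pair, PySem.Set.contains, PySem.Set.ofList]

theorem pvAL15 (r : String) : incompatible_pair "trend24_up" r = (pvClassify r == some 7) := by
  rw [← (pvGall r).2.2.2.2.2.2.2.1]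
  simp [incompatible_pair, PySem.Set.contains, PySem.Set.ofList]

theorem pvAL16 (r : String) : incompatible_pair "trend24_down" r = (pvClassify r == some 7) := by
  rw [← (pvGall r).2.2.2.2.2.2.2.1]
  simp [incompatible_pair, PySem.Set.contains, PySem.Set.ofList]

theorem pvAL17 (r : String) : incompatible_pair "trend72_up" r = (pvClassify r == some 8) := by
  rw [← (pvGall r).2.2.2.2.2.2.2.2.1]
  simp [incompatible_pair, PySem.Set.contains, PySem.Set.ofList]

theorem pvAL18 (r : String) : incompatible_pair "trend72_down" r = (pvClassify r == some 8) := by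
  rw [← (pvGall r).2.2.2.2.2.2.2.2.1]
  simp [incompatible_pair, PySem.Set.contains, PySem.Set.ofList]

theorem pvAL19 (r : String) : incompatible_pair "trend288_up" r = (pvClassify r == some 9) := by
  rw [← (pvGall r).2.2.2.2.2.2.2.2.2.1]
  simp [incompatible_pair, PySem.Set.contains, PySem.Set.ofList]

theorem pvAL20 (r : String) : incompatible_pair "trend288_down" r = (pvClassify r == some 9) := by
  rw [← (pvGall r).2.2.2.2.2.2.2.2.2.1]
  simp [incompatible_pair, PySem.Set.contains, PySem.Set.ofList]

theorem pvAL21 (r : String) : incompatible_pair "hour_0_7" r = (pvClassify r == some 10) := by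
  rw [← (pvGall r).2.2.2.2.2.2.2.2.2.2.1]
  simp [incompatible_pair, PySem.Set.contains, PySem.Set.ofList]

theorem pvAL22 (r : String) : incompatible_pair "hour_8_15" r = (pvClassify r == some 10) := by
  rw [← (pvGall r).2.2.2.2.2.2.2.2.2.2.1]
  simp [incompatible_pair, PySem.Set.contains, PySem.Set.ofList]

theorem pvAL23 (r : String) : incompatible_pair "hour_16_23" r = (pvClassify r == some 10) := by
  rw [← (pvGall r).2.2.2.2.2.2.2.2.2.2.1]
  simp [incompatible_pair, PySem.Set.contains, PySem.Set.ofList]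

theorem pvAL24 (r : String) : incompatible_pair "weekday" r = (pvClassify r == some 11) := by
  rw [← (pvGall r).2.2.2.2.2.2.2.2.2.2.2]
  simp [incompatible_pair, PySem.Set.contains, PySem.Set.ofList]

theorem pvAL25 (r : String) : incompatible_pair "weekend" r = (pvClassify r == some 11) := by
  rw [← (pvGall r).2.2.2.2.2.2.2.2.2.2.2]
  simp [incompatible_pair, PySem.Set.contains, PySem.Set.ofList]

theorem pvA_eq (l r : String) : incompatible_pair l r = (match pvClassify l with | none => false | some g => pvClassify r == some g) := by
  by_cases h0 : l = "high_atr"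
  · subst h0; exact pvAL0 r
  by_cases h1 : l = "low_atr"
  · subst h1; exact pvAL1 r
  by_cases h2 : l = "high_vol24"
  · subst h2; exact pvAL2 r
  by_cases h3 : l = "low_vol24"
  · subst h3; exact pvAL3 r
  by_cases h4 : l = "high_vol72"
  · subst h4; exact pvAL4 r
  by_cases h5 : l = "low_vol72"
  · subst h5; exact pvAL5 r
  by_cases h6 : l = "high_volume"
  · subst h6; exact pvAL6 r
  by_cases h7 : l = "low_volume"
  · subst h7; exact pvAL7 r
  by_cases h8 : l = "rsi_hot"
  · subst h8; exact pvAL8 r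
  by_cases h9 : l = "rsi_cold"
  · subst h9; exact pvAL9 r
  by_cases h10 : l = "rsi_mid"
  · subst h10; exact pvAL10 r
  by_cases h11 : l = "mom24_up"
  · subst h11; exact pvAL11 r
  by_cases h12 : l = "mom24_down"
  · subst h12; exact pvAL12 r
  by_cases h13 : l = "mom72_up"
  · subst h13; exact pvAL13 r
  by_cases h14 : l = "mom72_down"
  · subst h14; exact pvAL14 r
  by_cases h15 : l = "trend24_up"
  · subst h15; exact pvAL15 r
  by_cases h16 : l = "trend24_down"
  · subst h16; exact pvAL16 r
  by_cases h17 : l = "trend72_up"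
  · subst h17; exact pvAL17 r
  by_cases h18 : l = "trend72_down"
  · subst h18; exact pvAL18 r
  by_cases h19 : l = "trend288_up"
  · subst h19; exact pvAL19 r
  by_cases h20 : l = "trend288_down"
  · subst h20; exact pvAL20 r
  by_cases h21 : l = "hour_0_7"
  · subst h21; exact pvAL21 r
  by_cases h22 : l = "hour_8_15"
  · subst h22; exact pvAL22 r
  by_cases h23 : l = "hour_16_23"
  · subst h23; exact pvAL23 r
  by_cases h24 : l = "weekday"
  · subst h24; exact pvAL24 r
  by_cases h25 : l = "weekend"
  · subst h25; exact pvAL25 r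
  simp [incompatible_pair, pvClassify, PySem.Set.contains, PySem.Set.ofList, beq_iff_eq, h0, h1, h2, h3, h4, h5, h6, h7, h8, h9, h10, h11, h12, h13, h14, h15, h16, h17, h18, h19, h20, h21, h22, h23, h24, h25, Ne.symm h0, Ne.symm h1, Ne.symm h2, Ne.symm h3, Ne.symm h4, Ne.symm h5, Ne.symm h6, Ne.symm h7, Ne.symm h8, Ne.symm h9, Ne.symm h10, Ne.symm h11, Ne.symm h12, Ne.symm h13, Ne.symm h14, Ne.symm h15, Ne.symm h16, Ne.symm h17, Ne.symm h18, Ne.symm h19, Ne.symm h20, Ne.symm h21, Ne.symm h22, Ne.symm h23, Ne.symm h24, Ne.symm h25]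

-- ===== VERDICT (by name: the statement is the Claim_ definition above) =====
theorem incompatible_pair_spec : Claim_equal_incompatible_pair := by
  intro left right _
  unfold Spec_incompatible_pair
  simp only [incompatible_pair_alt, pvGet_eq]
  exact pvA_eq left right
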